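-- pv_equiv track=rewrite | github.com/BigBenlau/PitchBook_project | doc/data_docs_cn/generate_data_docs_cn.py | translate_description
-- ===== SOURCE A (Python) =====
-- def translate_description(text: str) -> str:
--     clean = " ".join(text.split())
--     if not clean:
--         return ""
--     replacements = [
--         ("General information on ", "記錄"),
--         (" relationship.", "之間的關聯資料。"),
--         (" relationships.", "之間的關聯資料。"),
--         (" companies.", "公司的基本資料。"),
--         (" deals.", "交易的基本資料。"),
--         (" investors.", "投資機構的基本資料。"),
--         (" funds.", "基金的基本資料。"),
--         (" people.", "人物的基本資料。"),
--         (" service providers.", "服務機構的基本資料。"),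
--         (" limited partners.", "有限合夥人的基本資料。"),
--     ]
--     out = clean
--     for src, dst in replacements:
--         out = out.replace(src, dst)
--     if out != clean:
--         return out
--     return f"官方摘要指出，此表用於記錄{clean.lower()}。"
-- ===== SOURCE B (Python) =====
-- def translate_description(text: str) -> str:
--     clean = " ".join(text.split())
--     if not clean:
--         return ""
--     replacements = [
--         ("General information on ", "記錄"),
--         (" relationship.", "之間的關聯資料。"),
--         (" relationships.", "之間的關聯資料。"),
--         (" companies.", "公司的基本資料。"),
--         (" deals.", "交易的基本資料。"),
--         (" investors.", "投資機構的基本資料。"),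
--         (" funds.", "基金的基本資料。"),
--         (" people.", "人物的基本資料。"),
--         (" service providers.", "服務機構的基本資料。"),
--         (" limited partners.", "有限合夥人的基本資料。"),
--     ]
--     parts = []
--     changed = False
--     i = 0
--     n = len(clean)
--     while i < n:
--         for src, dst in replacements:
--             if clean.startswith(src, i):
--                 parts.append(dst)
--                 i += len(src)
--                 changed = True
--                 break
--         else:
--             parts.append(clean[i])
--             i += 1
--     if changed:
--         return "".join(parts)
--     return f"官方摘要指出，此表用於記錄{clean.lower()}。"
-- ===== Notes on version B (the rewrite author's own statement) =====
-- stated objective: alternative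
-- what changed: B makes one left-to-right scan over the normalized string, trying the replacement keys in their listed order at each position and tracking a flag of whether any replacement matched, instead of A's ten sequential whole-string .replace passes and a final comparison of the result against the normalized input.
import Mathlib
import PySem

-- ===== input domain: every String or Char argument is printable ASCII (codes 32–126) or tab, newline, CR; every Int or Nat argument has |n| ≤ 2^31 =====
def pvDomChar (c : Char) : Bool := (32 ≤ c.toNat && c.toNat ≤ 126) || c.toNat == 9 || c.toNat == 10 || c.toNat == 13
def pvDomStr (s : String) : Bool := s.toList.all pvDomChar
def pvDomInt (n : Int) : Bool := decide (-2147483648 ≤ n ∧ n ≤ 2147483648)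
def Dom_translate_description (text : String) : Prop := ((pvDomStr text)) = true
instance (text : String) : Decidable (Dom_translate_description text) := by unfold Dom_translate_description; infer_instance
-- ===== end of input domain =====

-- B replaces the ten sequential .replace passes of A by ONE left-to-right scan that tries the
-- replacement keys in their listed order at each position (objective: alternative).

-- ===== PORT A =====
-- the replacement table, in A's listed order
def pvRepls : List (String × String) := [
  ("General information on ", "記錄"),
  (" relationship.", "之間的關聯資料。"),
  (" relationships.", "之間的關聯資料。"),
  (" companies.", "公司的基本資料。"),
  (" deals.", "交易的基本資料。"),
  (" investors.", "投資機構的基本資料。"),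
  (" funds.", "基金的基本資料。"),
  (" people.", "人物的基本資料。"),
  (" service providers.", "服務機構的基本資料。"),
  (" limited partners.", "有限合夥人的基本資料。")]

def translate_description (text : String) : String :=
  let clean := PySem.Str.join " " (PySem.Str.split₀ text)
  if clean = "" then ""
  else
    let out := pvRepls.foldl (fun out p => PySem.Str.replace out p.1 p.2) clean
    if out ≠ clean then out
    else "官方摘要指出，此表用於記錄" ++ PySem.Str.lower clean ++ "。"

-- ===== PORT B =====
-- B's table: the same pairs, held as character lists (the scan works position by position)
def pvPairs : List (List Char × List Char) := [
  (['G', 'e', 'n', 'e', 'r', 'a', 'l', ' ', 'i', 'n', 'f', 'o', 'r', 'm', 'a', 't', 'i', 'o', 'n', ' ', 'o', 'n', ' '],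
   ['記', '錄']),
  ([' ', 'r', 'e', 'l', 'a', 't', 'i', 'o', 'n', 's', 'h', 'i', 'p', '.'],
   ['之', '間', '的', '關', '聯', '資', '料', '。']),
  ([' ', 'r', 'e', 'l', 'a', 't', 'i', 'o', 'n', 's', 'h', 'i', 'p', 's', '.'],
   ['之', '間', '的', '關', '聯', '資', '料', '。']),
  ([' ', 'c', 'o', 'm', 'p', 'a', 'n', 'i', 'e', 's', '.'],
   ['公', '司', '的', '基', '本', '資', '料', '。']),
  ([' ', 'd', 'e', 'a', 'l', 's', '.'],
   ['交', '易', '的', '基', '本', '資', '料', '。']),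
  ([' ', 'i', 'n', 'v', 'e', 's', 't', 'o', 'r', 's', '.'],
   ['投', '資', '機', '構', '的', '基', '本', '資', '料', '。']),
  ([' ', 'f', 'u', 'n', 'd', 's', '.'],
   ['基', '金', '的', '基', '本', '資', '料', '。']),
  ([' ', 'p', 'e', 'o', 'p', 'l', 'e', '.'],
   ['人', '物', '的', '基', '本', '資', '料', '。']),
  ([' ', 's', 'e', 'r', 'v', 'i', 'c', 'e', ' ', 'p', 'r', 'o', 'v', 'i', 'd', 'e', 'r', 's', '.'],
   ['服', '務', '機', '構', '的', '基', '本', '資', '料', '。']),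
  ([' ', 'l', 'i', 'm', 'i', 't', 'e', 'd', ' ', 'p', 'a', 'r', 't', 'n', 'e', 'r', 's', '.'],
   ['有', '限', '合', '夥', '人', '的', '基', '本', '資', '料', '。'])
]

-- needed by pvScanGo's termination proof (every key is nonempty)
theorem pvPairs_keys_ne_nil : ∀ p ∈ pvPairs, p.1 ≠ [] := by decide

-- the while loop of B: at position i try the keys in order (for/break = find?), collecting parts
def pvScanGo : List Char → List (List Char) → Bool → List (List Char) × Bool
  | [], parts, changed => (parts, changed)
  | c :: t, parts, changed =>
    match h : pvPairs.find? (fun p => p.1.isPrefixOf (c :: t)) with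
    | some p => pvScanGo ((c :: t).drop p.1.length) (parts ++ [p.2]) true
    | none => pvScanGo t (parts ++ [[c]]) changed
termination_by l _ _ => l.length
decreasing_by
  · have hm := List.mem_of_find?_eq_some h
    have hne := pvPairs_keys_ne_nil p hm
    have : 0 < p.1.length := List.length_pos_of_ne_nil hne
    simp only [List.length_drop, List.length_cons]
    omega
  · simp

def translate_description_alt (text : String) : String :=
  let clean := PySem.Str.join " " (PySem.Str.split₀ text)
  if clean = "" then ""
  else
    let r := pvScanGo clean.toList [] false
    if r.2 then String.ofList (PySem.Chars.join [] r.1)   -- "".join(parts)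
    else "官方摘要指出，此表用於記錄" ++ PySem.Str.lower clean ++ "。"

-- ===== PRECONDITION & SPEC =====
def Spec_translate_description (text : String) (out : String) : Prop := out = translate_description_alt text
instance (text : String) (out : String) : Decidable (Spec_translate_description text out) := by unfold Spec_translate_description; infer_instance

-- ===== CLAIM (what is proved, stated in full; the proofs are below) =====
def Claim_equal_translate_description : Prop := ∀ (text : String), Dom_translate_description text → Spec_translate_description text (translate_description text)

-- ===== LEMMAS AND PROOFS =====

theorem pvMapEq : pvRepls.map (fun p => (p.1.toList, p.2.toList)) = pvPairs := by decide

def pvAscii (c : Char) : Bool := decide (c.toNat ≤ 127)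

-- fuel-free reformulation of Python's str.replace for a nonempty key c0 :: k'
def pvRep (c0 : Char) (k' v : List Char) : List Char → List Char
  | [] => []
  | c :: t => if (c0 :: k').isPrefixOf (c :: t)
      then v ++ pvRep c0 k' v (t.drop k'.length)
      else c :: pvRep c0 k' v t
termination_by l => l.length
decreasing_by
  · simp only [List.length_drop, List.length_cons]; omega
  · simp

def pvRepP (p : List Char × List Char) (s : List Char) : List Char :=
  match p.1 with
  | [] => s
  | c0 :: k' => pvRep c0 k' p.2 s

-- the one-key-at-a-time suffix-recursion view of B's scan
def pvScanFlat : List Char → List Char × Bool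
  | [] => ([], false)
  | c :: t =>
    match h : pvPairs.find? (fun p => p.1.isPrefixOf (c :: t)) with
    | some p => (p.2 ++ (pvScanFlat ((c :: t).drop p.1.length)).1, true)
    | none => (c :: (pvScanFlat t).1, (pvScanFlat t).2)
termination_by l => l.length
decreasing_by
  · have hm := List.mem_of_find?_eq_some h
    have hne := pvPairs_keys_ne_nil p hm
    have : 0 < p.1.length := List.length_pos_of_ne_nil hne
    simp only [List.length_drop, List.length_cons]
    omega
  · simp

-- decided facts about the fixed table
theorem pv_good : ∀ p ∈ pvPairs, p.1 ≠ [] ∧ p.1.all pvAscii = true ∧ p.2 ≠ [] ∧ p.2.all (fun c => !pvAscii c) = true := by decide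

theorem pv_nocross : List.Pairwise
    (fun pe pl : List Char × List Char => ∀ q < pl.1.length, 0 < q →
      ¬ (pl.1.drop q <+: pe.1) ∧ ¬ (pe.1 <+: pl.1.drop q)) pvPairs := by decide

-- "u is t with some listed replacements applied"
inductive PvDer : List Char → List Char → Prop
  | nil : PvDer [] []
  | keep (c : Char) {t u : List Char} : PvDer t u → PvDer (c :: t) (c :: u)
  | repl {k v t u : List Char} : (k, v) ∈ pvPairs → PvDer t u → PvDer (k ++ t) (v ++ u)

theorem pvDer_refl : ∀ t, PvDer t t := by
  intro t; induction t with
  | nil => exact PvDer.nil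
  | cons c t ih => exact PvDer.keep c ih

theorem pvDer_inv {t u : List Char} (h : PvDer t u) :
    (t = [] ∧ u = []) ∨
    (∃ c t' u', t = c :: t' ∧ u = c :: u' ∧ PvDer t' u') ∨
    (∃ k v t' u', (k, v) ∈ pvPairs ∧ t = k ++ t' ∧ u = v ++ u' ∧ PvDer t' u') := by
  cases h with
  | nil => exact Or.inl ⟨rfl, rfl⟩
  | keep c hd => exact Or.inr (Or.inl ⟨c, _, _, rfl, rfl, hd⟩)
  | repl mem hd => exact Or.inr (Or.inr ⟨_, _, _, _, mem, rfl, rfl, hd⟩)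

theorem pv_prefix_total {l a b : List Char} (ha : a <+: l) (hb : b <+: l) :
    a <+: b ∨ b <+: a := by
  rcases le_total a.length b.length with h | h
  · exact Or.inl (List.prefix_of_prefix_length_le ha hb h)
  · exact Or.inr (List.prefix_of_prefix_length_le hb ha h)

theorem pv_all_drop {l : List Char} {p : Char → Bool} (h : l.all p = true) (n : Nat) :
    (l.drop n).all p = true := by
  rw [List.all_eq_true] at h ⊢
  exact fun c hc => h c (List.mem_of_mem_drop hc)

theorem pvDer_split {t u : List Char} (h : PvDer t u) :
    ∀ k : List Char, k.all pvAscii = true → k <+: u →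
      k <+: t ∧ PvDer (t.drop k.length) (u.drop k.length) := by
  induction h with
  | nil =>
    intro k _ hpre
    have hk := List.prefix_nil.mp hpre; subst hk
    exact ⟨List.nil_prefix, PvDer.nil⟩
  | keep c hder ih =>
    intro k hk hpre
    cases k with
    | nil => exact ⟨List.nil_prefix, by simpa using PvDer.keep c hder⟩
    | cons a k2 =>
      obtain ⟨hac, hk2⟩ := List.cons_prefix_cons.mp hpre
      subst hac
      simp only [List.all_cons, Bool.and_eq_true] at hk
      obtain ⟨hp, hd⟩ := ih k2 hk.2 hk2
      exact ⟨List.cons_prefix_cons.mpr ⟨rfl, hp⟩, by simpa using hd⟩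
  | repl mem hder ih =>
    intro k hk hpre
    cases k with
    | nil => exact ⟨List.nil_prefix, by simpa using PvDer.repl mem hder⟩
    | cons a k2 =>
      exfalso
      obtain ⟨-, -, hvne, hvall⟩ := pv_good _ mem
      rename_i k0 v0 t0 u0
      cases v0 with
      | nil => exact hvne rfl
      | cons b v0' =>
        obtain ⟨hab, -⟩ := List.cons_prefix_cons.mp hpre
        subst hab
        simp only [List.all_cons, Bool.and_eq_true] at hk hvall
        rw [hk.1] at hvall
        simp at hvall

theorem pv_chinese_prefix_rep (c0 : Char) (k' v : List Char) (h0 : pvAscii c0 = true) :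
    ∀ w x : List Char, w.all (fun c => !pvAscii c) = true →
      pvRep c0 k' v (w ++ x) = w ++ pvRep c0 k' v x := by
  intro w
  induction w with
  | nil => intro x _; rfl
  | cons b w' ih =>
    intro x hall
    simp only [List.all_cons, Bool.and_eq_true, Bool.not_eq_true'] at hall
    have hne : ¬ ((c0 :: k') <+: (b :: (w' ++ x))) := by
      intro hpre
      obtain ⟨hc, -⟩ := List.cons_prefix_cons.mp hpre
      rw [hc] at h0
      rw [h0] at hall
      exact absurd hall.1 (by simp)
    rw [List.cons_append, pvRep, if_neg (by rw [List.isPrefixOf_iff_prefix]; exact hne)]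
    rw [ih x hall.2]; simp

theorem pvRep_skip (c0 : Char) (k' v : List Char) :
    ∀ x u : List Char, (∀ q < x.length, ¬ ((c0 :: k') <+: (x ++ u).drop q)) →
      pvRep c0 k' v (x ++ u) = x ++ pvRep c0 k' v u := by
  intro x
  induction x with
  | nil => intro u _; rfl
  | cons a x' ih =>
    intro u h
    have h0 := h 0 (by simp)
    simp only [List.drop_zero] at h0
    rw [List.cons_append, pvRep, if_neg (by rw [List.isPrefixOf_iff_prefix]; exact h0)]
    rw [ih u (fun q hq => by
      have := h (q + 1) (by simpa using Nat.succ_lt_succ hq)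
      simpa using this)]
    simp

theorem pvRep_der {c0 : Char} {k' v : List Char} (mem : (c0 :: k', v) ∈ pvPairs) :
    ∀ n (u t : List Char), u.length ≤ n → PvDer t u → PvDer t (pvRep c0 k' v u) := by
  intro n
  induction n with
  | zero =>
    intro u t hu hder
    have : u = [] := by cases u <;> simp_all
    subst this
    simpa [pvRep] using hder
  | succ n ih =>
    intro u t hu hder
    cases u with
    | nil => simpa [pvRep] using hder
    | cons c u' =>
      by_cases hpre : (c0 :: k') <+: (c :: u')
      · have hall := (pv_good _ mem).2.1
        obtain ⟨hp, hd⟩ := pvDer_split hder (c0 :: k') hall hpre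
        have ht := List.prefix_append_drop hp
        rw [pvRep, if_pos (by rw [List.isPrefixOf_iff_prefix]; exact hpre)]
        rw [ht]
        apply PvDer.repl mem
        have hlen : (u'.drop k'.length).length ≤ n := by
          simp only [List.length_drop]
          simp only [List.length_cons] at hu
          omega
        have hd' : PvDer ((List.drop (c0 :: k').length t)) (u'.drop k'.length) := by
          simpa using hd
        exact ih _ _ hlen hd'
      · rcases pvDer_inv hder with ⟨-, h2⟩ | ⟨c1, t1, u1, rfl, heq, hd⟩ |
            ⟨k2, v2, t2, u2, mem2, rfl, heq, hd⟩
        · exact absurd h2 (by simp)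
        · obtain ⟨rfl, rfl⟩ : c1 = c ∧ u1 = u' := by
            constructor <;> [exact (List.cons.injEq _ _ _ _ ▸ heq.symm).1;
              exact (List.cons.injEq _ _ _ _ ▸ heq.symm).2]
          rw [pvRep, if_neg (by rw [List.isPrefixOf_iff_prefix]; exact hpre)]
          apply PvDer.keep
          exact ih _ _ (by simp only [List.length_cons] at hu; omega) hd
        · obtain ⟨-, -, hv2ne, hv2all⟩ := pv_good _ mem2
          cases v2 with
          | nil => exact absurd rfl hv2ne
          | cons b v2' =>
            obtain ⟨rfl, rfl⟩ : c = b ∧ u' = v2' ++ u2 := by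
              have := heq.symm
              simp only [List.cons_append, List.cons.injEq] at this
              exact ⟨this.1.symm, this.2.symm⟩
            simp only [List.all_cons, Bool.and_eq_true] at hv2all
            rw [pvRep, if_neg (by rw [List.isPrefixOf_iff_prefix]; exact hpre)]
            have hc0 : pvAscii c0 = true := by
              have h' := (pv_good _ mem).2.1
              simp only [List.all_cons, Bool.and_eq_true] at h'
              exact h'.1
            rw [pv_chinese_prefix_rep c0 k' v hc0 v2' u2 hv2all.2]
            have hlen : u2.length ≤ n := by
              simp only [List.length_cons, List.length_append] at hu
              omega
            simpa using PvDer.repl mem2 (ih u2 t2 hlen hd)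

theorem pv_no_match_lift {t u k : List Char} (h : PvDer t u)
    (hk : k.all pvAscii = true) (hn : ¬ k <+: t) : ¬ k <+: u := by
  intro hpre
  exact hn (pvDer_split h k hk hpre).1

theorem pv_foldl_front (c : Char) (t : List Char)
    (hnm : ∀ p ∈ pvPairs, ¬ (p.1 <+: c :: t)) :
    ∀ qs : List (List Char × List Char), (∀ p ∈ qs, p ∈ pvPairs) →
      ∀ u, PvDer t u →
        qs.foldl (fun s p => pvRepP p s) (c :: u) = c :: qs.foldl (fun s p => pvRepP p s) u
        ∧ PvDer t (qs.foldl (fun s p => pvRepP p s) u) := by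
  intro qs
  induction qs with
  | nil => intro _ u hder; exact ⟨rfl, hder⟩
  | cons p qs' ih =>
    intro hmem u hder
    have hp := hmem p (List.mem_cons_self)
    obtain ⟨hne, hkall, -, -⟩ := pv_good p hp
    have hder' : PvDer (c :: t) (c :: u) := PvDer.keep c hder
    have hnotu : ¬ p.1 <+: (c :: u) := pv_no_match_lift hder' hkall (hnm p hp)
    obtain ⟨c0, k', hp1⟩ : ∃ c0 k', p.1 = c0 :: k' := by
      cases hp1 : p.1 with
      | nil => exact absurd hp1 hne
      | cons a b => exact ⟨a, b, rfl⟩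
    have hstep : pvRepP p (c :: u) = c :: pvRepP p u := by
      simp only [pvRepP, hp1]
      rw [pvRep, if_neg (by rw [List.isPrefixOf_iff_prefix, ← hp1]; exact hnotu)]
    have hmemd : (c0 :: k', p.2) ∈ pvPairs := by rw [← hp1]; exact hp
    have hderu : PvDer t (pvRepP p u) := by
      simp only [pvRepP, hp1]
      exact pvRep_der hmemd u.length u t le_rfl hder
    have := ih (fun q hq => hmem q (List.mem_cons_of_mem _ hq)) (pvRepP p u) hderu
    refine ⟨?_, this.2⟩
    simp only [List.foldl_cons, hstep]
    exact this.1

theorem pv_foldl_skip (ps : List Char × List Char) (t : List Char) :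
    ∀ qs : List (List Char × List Char),
      (∀ p ∈ qs, p ∈ pvPairs ∧ ¬ (p.1 <+: ps.1 ++ t) ∧
        (∀ q < ps.1.length, 0 < q → ¬ (ps.1.drop q <+: p.1) ∧ ¬ (p.1 <+: ps.1.drop q))) →
      ∀ u, PvDer t u →
        qs.foldl (fun s p => pvRepP p s) (ps.1 ++ u) = ps.1 ++ qs.foldl (fun s p => pvRepP p s) u
        ∧ PvDer t (qs.foldl (fun s p => pvRepP p s) u) := by
  intro qs
  induction qs with
  | nil => intro _ u hder; exact ⟨rfl, hder⟩
  | cons p qs' ih =>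
    intro hq u hder
    obtain ⟨hpmem, hnm, hR⟩ := hq p (List.mem_cons_self)
    obtain ⟨hne, hkall, -, -⟩ := pv_good p hpmem
    obtain ⟨c0, k', hp1⟩ : ∃ c0 k', p.1 = c0 :: k' := by
      cases hp1 : p.1 with
      | nil => exact absurd hp1 hne
      | cons a b => exact ⟨a, b, rfl⟩
    have hskip : ∀ q < ps.1.length, ¬ ((c0 :: k') <+: (ps.1 ++ u).drop q) := by
      intro q hql hpre
      rw [← hp1] at hpre
      rcases Nat.eq_zero_or_pos q with hq0 | hqpos
      · subst hq0
        simp only [List.drop_zero] at hpre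
        rcases pv_prefix_total hpre (List.prefix_append ps.1 u) with h | h
        · exact hnm (h.trans (List.prefix_append ps.1 t))
        · have hp1r : p.1 = ps.1 ++ p.1.drop ps.1.length := List.prefix_append_drop h
          rw [hp1r] at hpre
          have hru : p.1.drop ps.1.length <+: u := (List.prefix_append_right_inj ps.1).mp hpre
          have hrall : (p.1.drop ps.1.length).all pvAscii = true := pv_all_drop hkall _
          have hrt := (pvDer_split hder _ hrall hru).1
          exact hnm (hp1r ▸ (List.prefix_append_right_inj ps.1).mpr hrt)
      · rw [List.drop_append_of_le_length (le_of_lt hql)] at hpre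
        rcases hR q hql hqpos with ⟨hR1, hR2⟩
        rcases pv_prefix_total hpre (List.prefix_append (ps.1.drop q) u) with h | h
        · exact hR2 h
        · exact hR1 h
    have hstep : pvRepP p (ps.1 ++ u) = ps.1 ++ pvRepP p u := by
      simp only [pvRepP, hp1]
      exact pvRep_skip c0 k' p.2 ps.1 u hskip
    have hmemd : (c0 :: k', p.2) ∈ pvPairs := by rw [← hp1]; exact hpmem
    have hderu : PvDer t (pvRepP p u) := by
      simp only [pvRepP, hp1]
      exact pvRep_der hmemd u.length u t le_rfl hder
    have := ih (fun q hq' => hq q (List.mem_cons_of_mem _ hq')) (pvRepP p u) hderu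
    refine ⟨?_, this.2⟩
    simp only [List.foldl_cons, hstep]
    exact this.1

theorem pv_foldl_chinese (t : List Char) :
    ∀ qs : List (List Char × List Char), (∀ p ∈ qs, p ∈ pvPairs) →
      ∀ w u : List Char, w.all (fun c => !pvAscii c) = true → PvDer t u →
        qs.foldl (fun s p => pvRepP p s) (w ++ u) = w ++ qs.foldl (fun s p => pvRepP p s) u
        ∧ PvDer t (qs.foldl (fun s p => pvRepP p s) u) := by
  intro qs
  induction qs with
  | nil => intro _ w u _ hder; exact ⟨rfl, hder⟩
  | cons p qs' ih =>
    intro hmem w u hw hder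
    have hp := hmem p (List.mem_cons_self)
    obtain ⟨hne, hkall, -, -⟩ := pv_good p hp
    obtain ⟨c0, k', hp1⟩ : ∃ c0 k', p.1 = c0 :: k' := by
      cases hp1 : p.1 with
      | nil => exact absurd hp1 hne
      | cons a b => exact ⟨a, b, rfl⟩
    have hc0 : pvAscii c0 = true := by
      rw [hp1] at hkall
      simp only [List.all_cons, Bool.and_eq_true] at hkall
      exact hkall.1
    have hstep : pvRepP p (w ++ u) = w ++ pvRepP p u := by
      simp only [pvRepP, hp1]
      exact pv_chinese_prefix_rep c0 k' p.2 hc0 w u hw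
    have hmemd : (c0 :: k', p.2) ∈ pvPairs := by rw [← hp1]; exact hp
    have hderu : PvDer t (pvRepP p u) := by
      simp only [pvRepP, hp1]
      exact pvRep_der hmemd u.length u t le_rfl hder
    have := ih (fun q hq => hmem q (List.mem_cons_of_mem _ hq)) w (pvRepP p u) hw hderu
    refine ⟨?_, this.2⟩
    simp only [List.foldl_cons, hstep]
    exact this.1

theorem pv_chain_cons_match (ps : List Char × List Char) (t : List Char)
    (ps1 ps2 : List (List Char × List Char))
    (hsplit : pvPairs = ps1 ++ ps :: ps2)
    (hnm1 : ∀ p ∈ ps1, ¬ (p.1 <+: ps.1 ++ t)) :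
    pvPairs.foldl (fun s p => pvRepP p s) (ps.1 ++ t)
      = ps.2 ++ pvPairs.foldl (fun s p => pvRepP p s) t := by
  have hmems : ps ∈ pvPairs := by
    rw [hsplit]; exact List.mem_append_right _ List.mem_cons_self
  obtain ⟨hnes, hkalls, hvnes, hvalls⟩ := pv_good ps hmems
  have hpair := pv_nocross
  rw [hsplit] at hpair
  have hcross := (List.pairwise_append.mp hpair).2.2
  have hqs1 : ∀ p ∈ ps1, p ∈ pvPairs ∧ ¬ (p.1 <+: ps.1 ++ t) ∧
      (∀ q < ps.1.length, 0 < q → ¬ (ps.1.drop q <+: p.1) ∧ ¬ (p.1 <+: ps.1.drop q)) := by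
    intro p hp
    exact ⟨by rw [hsplit]; exact List.mem_append_left _ hp, hnm1 p hp,
      hcross p hp ps List.mem_cons_self⟩
  obtain ⟨c0, k', hp1⟩ : ∃ c0 k', ps.1 = c0 :: k' := by
    cases hp1 : ps.1 with
    | nil => exact absurd hp1 hnes
    | cons a b => exact ⟨a, b, rfl⟩
  have h1 := pv_foldl_skip ps t ps1 hqs1 t (pvDer_refl t)
  have hmemd : (c0 :: k', ps.2) ∈ pvPairs := by rw [← hp1]; exact hmems
  have hstep2 : pvRepP ps (ps.1 ++ ps1.foldl (fun s p => pvRepP p s) t)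
      = ps.2 ++ pvRep c0 k' ps.2 (ps1.foldl (fun s p => pvRepP p s) t) := by
    simp only [pvRepP, hp1, List.cons_append]
    rw [pvRep, if_pos (by
      rw [List.isPrefixOf_iff_prefix]
      exact List.cons_prefix_cons.mpr ⟨rfl, List.prefix_append _ _⟩)]
    rw [List.drop_left]
  have hder2 : PvDer t (pvRep c0 k' ps.2 (ps1.foldl (fun s p => pvRepP p s) t)) :=
    pvRep_der hmemd _ _ _ le_rfl h1.2
  have hqs2 : ∀ p ∈ ps2, p ∈ pvPairs := fun p hp => by
    rw [hsplit]; exact List.mem_append_right _ (List.mem_cons_of_mem _ hp)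
  have h3 := pv_foldl_chinese t ps2 hqs2 ps.2 _ hvalls hder2
  have hrepP : pvRepP ps (ps1.foldl (fun s p => pvRepP p s) t)
      = pvRep c0 k' ps.2 (ps1.foldl (fun s p => pvRepP p s) t) := by
    simp [pvRepP, hp1]
  calc pvPairs.foldl (fun s p => pvRepP p s) (ps.1 ++ t)
      = ps2.foldl (fun s p => pvRepP p s)
          (pvRepP ps (ps1.foldl (fun s p => pvRepP p s) (ps.1 ++ t))) := by
        rw [hsplit]; simp [List.foldl_append]
    _ = ps2.foldl (fun s p => pvRepP p s)
          (pvRepP ps (ps.1 ++ ps1.foldl (fun s p => pvRepP p s) t)) := by rw [h1.1]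
    _ = ps2.foldl (fun s p => pvRepP p s)
          (ps.2 ++ pvRep c0 k' ps.2 (ps1.foldl (fun s p => pvRepP p s) t)) := by rw [hstep2]
    _ = ps.2 ++ ps2.foldl (fun s p => pvRepP p s)
          (pvRep c0 k' ps.2 (ps1.foldl (fun s p => pvRepP p s) t)) := h3.1
    _ = ps.2 ++ pvPairs.foldl (fun s p => pvRepP p s) t := by
        rw [hsplit]; simp [List.foldl_append, hrepP]

theorem pv_foldl_nil : ∀ qs : List (List Char × List Char),
    qs.foldl (fun s p => pvRepP p s) [] = [] := by
  intro qs
  induction qs with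
  | nil => rfl
  | cons p qs ih =>
    have h : pvRepP p [] = [] := by
      cases hp : p.1 with
      | nil => simp [pvRepP, hp]
      | cons a b => simp [pvRepP, hp, pvRep]
    simp only [List.foldl_cons, h, ih]

theorem pv_scanFlat_nil : pvScanFlat [] = ([], false) := by
  simp [pvScanFlat]

theorem pv_chain_eq_scan : ∀ n (s : List Char), s.length ≤ n →
    pvPairs.foldl (fun s p => pvRepP p s) s = (pvScanFlat s).1
    ∧ ((pvScanFlat s).2 = false → (pvScanFlat s).1 = s)
    ∧ ((pvScanFlat s).2 = true → ∃ c ∈ (pvScanFlat s).1, pvAscii c = false) := by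
  intro n
  induction n with
  | zero =>
    intro s hs
    have hsnil : s = [] := by cases s <;> simp_all
    subst hsnil
    refine ⟨?_, fun _ => ?_, fun h => ?_⟩
    · rw [pv_foldl_nil, pv_scanFlat_nil]
    · rw [pv_scanFlat_nil]
    · rw [pv_scanFlat_nil] at h; simp at h
  | succ n ih =>
    intro s hs
    cases s with
    | nil =>
      refine ⟨?_, fun _ => ?_, fun h => ?_⟩
      · rw [pv_foldl_nil, pv_scanFlat_nil]
      · rw [pv_scanFlat_nil]
      · rw [pv_scanFlat_nil] at h; simp at h
    | cons c t =>
      cases hfind : pvPairs.find? (fun p => p.1.isPrefixOf (c :: t)) with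
      | none =>
        have hscan : pvScanFlat (c :: t) = (c :: (pvScanFlat t).1, (pvScanFlat t).2) := by
          rw [pvScanFlat, hfind]
        have hnm : ∀ p ∈ pvPairs, ¬ (p.1 <+: c :: t) := by
          intro p hp hpre
          have h' := List.find?_eq_none.mp hfind p hp
          rw [List.isPrefixOf_iff_prefix.mpr hpre] at h'
          exact h' rfl
        have hfront := pv_foldl_front c t hnm pvPairs (fun p hp => hp) t (pvDer_refl t)
        have iht := ih t (by simp only [List.length_cons] at hs; omega)
        refine ⟨?_, fun h2 => ?_, fun h2 => ?_⟩
        · rw [hscan, hfront.1, iht.1]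
        · rw [hscan] at h2 ⊢
          simp only at h2 ⊢
          rw [iht.2.1 h2]
        · rw [hscan] at h2 ⊢
          simp only at h2 ⊢
          obtain ⟨cb, hm, hb⟩ := iht.2.2 h2
          exact ⟨cb, List.mem_cons_of_mem _ hm, hb⟩
      | some p =>
        obtain ⟨hpred, as, bs, hsplit, hprev⟩ := List.find?_eq_some_iff_append.mp hfind
        have hp : p ∈ pvPairs := by
          rw [hsplit]; exact List.mem_append_right _ List.mem_cons_self
        have hpre : p.1 <+: c :: t := List.isPrefixOf_iff_prefix.mp hpred
        have hne := (pv_good p hp).1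
        have hct : c :: t = p.1 ++ (c :: t).drop p.1.length := List.prefix_append_drop hpre
        have hnm1 : ∀ x ∈ as, ¬ (x.1 <+: p.1 ++ (c :: t).drop p.1.length) := by
          intro x hx hpx
          have h' := hprev x hx
          rw [← hct] at hpx
          rw [List.isPrefixOf_iff_prefix.mpr hpx] at h'
          simp at h'
        have hchain := pv_chain_cons_match p ((c :: t).drop p.1.length) as bs hsplit hnm1
        have ihl : ((c :: t).drop p.1.length).length ≤ n := by
          have hpos : 0 < p.1.length := List.length_pos_of_ne_nil hne
          simp only [List.length_drop, List.length_cons]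
          simp only [List.length_cons] at hs
          omega
        have iht := ih _ ihl
        have hscan : pvScanFlat (c :: t)
            = (p.2 ++ (pvScanFlat ((c :: t).drop p.1.length)).1, true) := by
          rw [pvScanFlat, hfind]
        refine ⟨?_, fun h2 => ?_, fun _ => ?_⟩
        · rw [hscan]
          conv_lhs => rw [hct]
          rw [hchain, iht.1]
        · rw [hscan] at h2; simp at h2
        · rw [hscan]
          obtain ⟨-, -, hvne, hvall⟩ := pv_good p hp
          cases hv : p.2 with
          | nil => exact absurd hv hvne
          | cons b rest =>
            refine ⟨b, by simp, ?_⟩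
            rw [hv] at hvall
            simp only [List.all_cons, Bool.and_eq_true, Bool.not_eq_true'] at hvall
            exact hvall.1

theorem pvScanGo_eq : ∀ n (l : List Char), l.length ≤ n → ∀ parts ch,
    (pvScanGo l parts ch).1.flatten = parts.flatten ++ (pvScanFlat l).1
    ∧ (pvScanGo l parts ch).2 = (ch || (pvScanFlat l).2) := by
  intro n
  induction n with
  | zero =>
    intro l hl parts ch
    have : l = [] := by cases l <;> simp_all
    subst this
    simp [pvScanGo, pv_scanFlat_nil]
  | succ n ih =>
    intro l hl parts ch
    cases l with
    | nil => simp [pvScanGo, pv_scanFlat_nil]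
    | cons c t =>
      cases hfind : pvPairs.find? (fun p => p.1.isPrefixOf (c :: t)) with
      | none =>
        have hgo : pvScanGo (c :: t) parts ch = pvScanGo t (parts ++ [[c]]) ch := by
          rw [pvScanGo, hfind]
        have hscan : pvScanFlat (c :: t) = (c :: (pvScanFlat t).1, (pvScanFlat t).2) := by
          rw [pvScanFlat, hfind]
        have iht := ih t (by simp only [List.length_cons] at hl; omega) (parts ++ [[c]]) ch
        rw [hgo, hscan]
        refine ⟨?_, ?_⟩
        · rw [iht.1]; simp
        · rw [iht.2]
      | some p =>
        have hne := (pv_good p (List.mem_of_find?_eq_some hfind)).1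
        have hgo : pvScanGo (c :: t) parts ch
            = pvScanGo ((c :: t).drop p.1.length) (parts ++ [p.2]) true := by
          rw [pvScanGo, hfind]
        have hscan : pvScanFlat (c :: t)
            = (p.2 ++ (pvScanFlat ((c :: t).drop p.1.length)).1, true) := by
          rw [pvScanFlat, hfind]
        have hll : ((c :: t).drop p.1.length).length ≤ n := by
          have hpos : 0 < p.1.length := List.length_pos_of_ne_nil hne
          simp only [List.length_drop, List.length_cons]
          simp only [List.length_cons] at hl
          omega
        have iht := ih _ hll (parts ++ [p.2]) true
        rw [hgo, hscan]
        refine ⟨?_, ?_⟩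
        · rw [iht.1]; simp
        · rw [iht.2]; simp

theorem pv_join_nil (xs : List (List Char)) : PySem.Chars.join [] xs = xs.flatten := by
  simp only [PySem.Chars.join]
  induction xs with
  | nil => simp [List.intercalate]
  | cons a tl ih => cases tl <;> simp_all [List.intercalate, List.intersperse]

theorem pv_foldl_str (L : List (String × String)) : ∀ s : String,
    (L.foldl (fun out p => PySem.Str.replace out p.1 p.2) s).toList
      = (L.map (fun p => (p.1.toList, p.2.toList))).foldl
          (fun out p => PySem.Chars.replace out p.1 p.2) s.toList := by
  induction L with
  | nil => intro s; simp
  | cons a L ih =>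
    intro s
    simp only [List.foldl_cons, List.map_cons]
    rw [ih (PySem.Str.replace s a.1 a.2), PySem.Str.toList_replace]

theorem pv_go_eq (c0 : Char) (k' v : List Char) : ∀ (fuel : Nat) (l acc : List Char),
    l.length ≤ fuel →
    PySem.Chars.replace.go (c0 :: k') v fuel l acc = acc.reverse ++ pvRep c0 k' v l := by
  intro fuel
  induction fuel with
  | zero =>
    intro l acc h
    have hl : l = [] := by cases l <;> simp_all
    subst hl
    rw [PySem.Chars.replace.go.eq_def]
    simp [pvRep]
  | succ fuel ihf =>
    intro l acc h
    cases l with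
    | nil =>
      rw [PySem.Chars.replace.go.eq_def]
      simp [pvRep]
    | cons c t =>
      rw [PySem.Chars.replace.go.eq_def]
      simp only []
      by_cases hp : (c0 :: k').isPrefixOf (c :: t) = true
      · rw [if_pos hp]
        have hlen : ((c :: t).drop (c0 :: k').length).length ≤ fuel := by
          simp only [List.length_drop, List.length_cons] at *
          omega
        rw [ihf _ _ hlen]
        rw [pvRep, if_pos hp]
        simp
      · rw [if_neg hp]
        have hlen : t.length ≤ fuel := by
          simp only [List.length_cons] at h
          omega
        rw [ihf _ _ hlen]
        rw [pvRep, if_neg hp]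
        simp

theorem pv_replace_eq_rep (c0 : Char) (k' v : List Char) (s : List Char) :
    PySem.Chars.replace s (c0 :: k') v = pvRep c0 k' v s := by
  rw [PySem.Chars.replace]
  simp only [List.isEmpty_cons, if_false, Bool.false_eq_true]
  rw [pv_go_eq c0 k' v s.length s [] le_rfl]
  simp

theorem pv_foldl_chars_eq_repP : ∀ qs : List (List Char × List Char),
    (∀ p ∈ qs, p.1 ≠ []) → ∀ u,
      qs.foldl (fun out p => PySem.Chars.replace out p.1 p.2) u
        = qs.foldl (fun s p => pvRepP p s) u := by
  intro qs
  induction qs with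
  | nil => intro _ u; rfl
  | cons p qs' ih =>
    intro hne u
    obtain ⟨c0, k', hp1⟩ : ∃ c0 k', p.1 = c0 :: k' := by
      cases hp1 : p.1 with
      | nil => exact absurd hp1 (hne p List.mem_cons_self)
      | cons a b => exact ⟨a, b, rfl⟩
    simp only [List.foldl_cons]
    rw [hp1, pv_replace_eq_rep]
    have : pvRepP p u = pvRep c0 k' p.2 u := by simp [pvRepP, hp1]
    rw [← this]
    exact ih (fun q hq => hne q (List.mem_cons_of_mem _ hq)) _

theorem pv_mem_intercalate {c : Char} {sep : List Char} : ∀ {parts : List (List Char)},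
    c ∈ List.intercalate sep parts → c ∈ sep ∨ ∃ w ∈ parts, c ∈ w := by
  intro parts
  induction parts with
  | nil => intro h; simp [List.intercalate] at h
  | cons a tl ih =>
    intro h
    cases tl with
    | nil =>
      simp [List.intercalate] at h
      exact Or.inr ⟨a, by simp, h⟩
    | cons b tl2 =>
      have heq : List.intercalate sep (a :: b :: tl2)
          = a ++ (sep ++ List.intercalate sep (b :: tl2)) := by
        simp [List.intercalate]
      rw [heq] at h
      rcases List.mem_append.mp h with h1 | h1
      · exact Or.inr ⟨a, by simp, h1⟩
      · rcases List.mem_append.mp h1 with h2 | h2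
        · exact Or.inl h2
        · rcases ih h2 with h3 | ⟨w, hw, hc⟩
          · exact Or.inl h3
          · exact Or.inr ⟨w, List.mem_cons_of_mem _ hw, hc⟩

theorem pv_split0_go_mem : ∀ (l cur : List Char) (acc : List (List Char)) (w : List Char),
    w ∈ PySem.Chars.split₀.go l cur acc → ∀ c ∈ w, c ∈ l ∨ c ∈ cur ∨ ∃ w' ∈ acc, c ∈ w' := by
  intro l
  induction l with
  | nil =>
    intro cur acc w hw c hc
    simp only [PySem.Chars.split₀.go] at hw
    by_cases hcur : cur.isEmpty = true
    · rw [if_pos hcur] at hw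
      exact Or.inr (Or.inr ⟨w, List.mem_reverse.mp hw, hc⟩)
    · rw [if_neg hcur] at hw
      rcases List.mem_cons.mp (List.mem_reverse.mp hw) with h1 | h1
      · subst h1; exact Or.inr (Or.inl (List.mem_reverse.mp hc))
      · exact Or.inr (Or.inr ⟨w, h1, hc⟩)
  | cons d rest ih =>
    intro cur acc w hw c hc
    simp only [PySem.Chars.split₀.go] at hw
    by_cases hsp : PySem.Chars.isspace d = true
    · rw [if_pos hsp] at hw
      by_cases hcur : cur.isEmpty = true
      · rw [if_pos hcur] at hw
        rcases ih [] acc w hw c hc with h | h | ⟨w', hw', hc'⟩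
        · exact Or.inl (List.mem_cons_of_mem _ h)
        · simp at h
        · exact Or.inr (Or.inr ⟨w', hw', hc'⟩)
      · rw [if_neg hcur] at hw
        rcases ih [] (cur.reverse :: acc) w hw c hc with h | h | ⟨w', hw', hc'⟩
        · exact Or.inl (List.mem_cons_of_mem _ h)
        · simp at h
        · rcases List.mem_cons.mp hw' with h1 | h1
          · subst h1; exact Or.inr (Or.inl (List.mem_reverse.mp hc'))
          · exact Or.inr (Or.inr ⟨w', h1, hc'⟩)
    · rw [if_neg hsp] at hw
      rcases ih (d :: cur) acc w hw c hc with h | h | ⟨w', hw', hc'⟩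
      · exact Or.inl (List.mem_cons_of_mem _ h)
      · rcases List.mem_cons.mp h with h1 | h1
        · exact Or.inl (by simp [h1])
        · exact Or.inr (Or.inl h1)
      · exact Or.inr (Or.inr ⟨w', hw', hc'⟩)

theorem pv_clean_ascii (text : String) (hdom : Dom_translate_description text) :
    (PySem.Str.join " " (PySem.Str.split₀ text)).toList.all pvAscii = true := by
  have hdomc : ∀ c ∈ text.toList, pvAscii c = true := by
    intro c hc
    have h := List.all_eq_true.mp hdom c hc
    simp only [pvDomChar, Bool.or_eq_true, Bool.and_eq_true, decide_eq_true_eq,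
      beq_iff_eq] at h
    simp only [pvAscii, decide_eq_true_eq]
    omega
  rw [List.all_eq_true]
  intro c hc
  rw [PySem.Str.toList_join] at hc
  simp only [PySem.Chars.join] at hc
  rcases pv_mem_intercalate hc with h | ⟨w, hw, hcw⟩
  · have : c = ' ' := by
      have : (" ").toList = [' '] := by decide
      rw [this] at h
      simpa using h
    subst this; decide
  · simp only [PySem.Str.split₀, List.map_map, List.mem_map] at hw
    obtain ⟨w', hw', rfl⟩ := hw
    simp only [Function.comp, String.toList_ofList] at hcw
    have hsplit : w' ∈ PySem.Chars.split₀.go text.toList [] [] := by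
      simpa [PySem.Chars.split₀] using hw'
    rcases pv_split0_go_mem text.toList [] [] w' hsplit c hcw with h | h | ⟨w2, hw2, -⟩
    · exact hdomc c h
    · simp at h
    · simp at hw2

-- ===== VERDICT (by name: the statement is the Claim_ definition above) =====
theorem translate_description_spec : Claim_equal_translate_description := by
  intro text hdom
  unfold Spec_translate_description translate_description translate_description_alt
  simp only []
  set clean := PySem.Str.join " " (PySem.Str.split₀ text) with hclean
  by_cases hempty : clean = ""
  · simp [hempty]
  · rw [if_neg hempty, if_neg hempty]
    have hascii : clean.toList.all pvAscii = true := pv_clean_ascii text hdom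
    have hout : (pvRepls.foldl (fun out p => PySem.Str.replace out p.1 p.2) clean).toList
        = (pvScanFlat clean.toList).1 := by
      rw [pv_foldl_str pvRepls clean, pvMapEq,
          pv_foldl_chars_eq_repP pvPairs (fun p hp => (pv_good p hp).1)]
      exact (pv_chain_eq_scan clean.toList.length clean.toList le_rfl).1
    have hgo := pvScanGo_eq clean.toList.length clean.toList le_rfl [] false
    cases hflag : (pvScanFlat clean.toList).2 with
    | false =>
      have h1 : (pvScanFlat clean.toList).1 = clean.toList :=
        (pv_chain_eq_scan clean.toList.length clean.toList le_rfl).2.1 hflag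
      have houtc : pvRepls.foldl (fun out p => PySem.Str.replace out p.1 p.2) clean = clean :=
        String.toList_inj.mp (by rw [hout, h1])
      have hr2 : (pvScanGo clean.toList [] false).2 = false := by
        rw [hgo.2, hflag]; rfl
      rw [houtc]
      simp [hr2]
    | true =>
      obtain ⟨cbad, hcm, hcbad⟩ :=
        (pv_chain_eq_scan clean.toList.length clean.toList le_rfl).2.2 hflag
      have hne2 : pvRepls.foldl (fun out p => PySem.Str.replace out p.1 p.2) clean ≠ clean := by
        intro he
        have hmem : cbad ∈ clean.toList := by
          rw [← String.toList_inj.mpr he, hout]; exact hcm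
        have := List.all_eq_true.mp hascii cbad hmem
        rw [hcbad] at this
        exact absurd this (by simp)
      have hr2 : (pvScanGo clean.toList [] false).2 = true := by
        rw [hgo.2, hflag]; rfl
      rw [if_pos hne2, hr2]
      simp only [if_true]
      rw [pv_join_nil, hgo.1]
      simp only [List.flatten_nil, List.nil_append]
      rw [← hout, String.ofList_toList]
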